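-- pv_equiv track=rewrite | github.com/kj-jondell/aoc-2023 | day-13/__main__.py | get_reflection_points
-- ===== SOURCE A (Python) =====
-- def get_reflection_points(line: str):
--     reflection_points = []
--
--     for reflection_point in range(1,len(line)):
--         original_line = line[0:reflection_point]
--         reflected_line = line[reflection_point:]
--         if len(original_line) < len(reflected_line):
--             reflected_line = reflected_line[:len(original_line)]
--         elif len(original_line) > len(reflected_line):
--             original_line = original_line[len(original_line)-len(reflected_line):]
--         if original_line == reflected_line[::-1]:
--             reflection_points.append(reflection_point)
--     return reflection_points
-- ===== SOURCE B (Python) =====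
-- def get_reflection_points(line: str):
--     n = len(line)
--     result = []
--     for point in range(1, n):
--         i = point - 1
--         j = point
--         while i >= 0 and j < n and line[i] == line[j]:
--             i -= 1
--             j += 1
--         if i < 0 or j >= n:
--             result.append(point)
--     return result
-- ===== Notes on version B (the rewrite author's own statement) =====
-- stated objective: alternative
-- what changed: Replaces A's per-split slicing, truncation and reversed-copy comparison with an in-place two-pointer expansion around each split point that compares characters pairwise and stops at the first mismatch or an edge; it trades A's bulk slice copies for per-character comparisons.
import Mathlib
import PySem

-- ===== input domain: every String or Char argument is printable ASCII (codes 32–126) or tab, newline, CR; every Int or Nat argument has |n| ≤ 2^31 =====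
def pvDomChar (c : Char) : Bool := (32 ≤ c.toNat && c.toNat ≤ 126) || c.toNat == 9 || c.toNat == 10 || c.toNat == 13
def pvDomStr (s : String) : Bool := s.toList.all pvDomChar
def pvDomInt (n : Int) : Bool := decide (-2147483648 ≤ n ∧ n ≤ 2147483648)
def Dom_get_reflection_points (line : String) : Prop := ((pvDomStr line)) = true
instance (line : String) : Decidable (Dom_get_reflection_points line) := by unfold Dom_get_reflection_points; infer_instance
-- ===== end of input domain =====

-- B replaces A's per-split slice/reverse/compare with an in-place two-pointer
-- expansion around each split point (alternative decomposition, same worst-case cost).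

-- ===== PORT A =====
-- literal transliteration of A: slices via PySem.List.slice; `[::-1]` on the
-- truncated slice is ported as List.reverse (exact for a full step -1 slice).
def get_reflection_points (line : String) : List Int :=
  let l := line.toList
  (PySem.List.pyRange 1 (l.length : Int) 1).foldl (fun reflection_points reflection_point =>
    let original_line := PySem.List.slice l (some 0) (some reflection_point)
    let reflected_line := PySem.List.slice l (some reflection_point) none
    let reflected_line2 :=
      if original_line.length < reflected_line.length then
        PySem.List.slice reflected_line none (some (original_line.length : Int))
      else reflected_line
    let original_line2 :=
      if original_line.length > reflected_line.length then
        PySem.List.slice original_line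
          (some ((original_line.length : Int) - (reflected_line.length : Int))) none
      else original_line
    if original_line2 = reflected_line2.reverse then
      reflection_points ++ [reflection_point]
    else reflection_points) []

-- ===== PORT B =====
-- the `while i >= 0 and j < n and line[i] == line[j]` loop of Source B, followed by
-- its `i < 0 or j >= n` success test
def pvExpand (l : List Char) (i : Int) (j : Int) : Bool :=
  if h : 0 ≤ i ∧ j < (l.length : Int) ∧ PySem.List.pyGet? l i = PySem.List.pyGet? l j then
    pvExpand l (i - 1) (j + 1)
  else
    decide (i < 0 ∨ (l.length : Int) ≤ j)
termination_by ((l.length : Int) - j).toNat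
decreasing_by omega

def get_reflection_points_alt (line : String) : List Int :=
  let l := line.toList
  (PySem.List.pyRange 1 (l.length : Int) 1).foldl (fun result point =>
    if pvExpand l (point - 1) point then result ++ [point] else result) []

-- ===== PRECONDITION & SPEC =====
def Spec_get_reflection_points (line : String) (out : List Int) : Prop := out = get_reflection_points_alt line
instance (line : String) (out : List Int) : Decidable (Spec_get_reflection_points line out) := by unfold Spec_get_reflection_points; infer_instance

-- ===== CLAIM (what is proved, stated in full; the proofs are below) =====
def Claim_equal_get_reflection_points : Prop := ∀ (line : String), Dom_get_reflection_points line → Spec_get_reflection_points line (get_reflection_points line)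

-- ===== LEMMAS AND PROOFS =====

-- the expansion loop succeeds iff every pair it could visit inside the bounds matches
theorem pvExpand_iff (l : List Char) (i j : Int) :
    pvExpand l i j = true ↔
      ∀ t : Nat, 0 ≤ i - t → j + t < (l.length : Int) →
        PySem.List.pyGet? l (i - t) = PySem.List.pyGet? l (j + t) := by
  fun_induction pvExpand l i j with
  | case1 i j h ih =>
    rw [ih]
    constructor
    · intro H t h0 hn
      match t with
      | 0 => simpa using h.2.2
      | (s+1) =>
        have := H s (by push_cast at h0 ⊢; omega) (by push_cast at hn ⊢; omega)
        convert this using 2 <;> push_cast <;> ring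
    · intro H t h0 hn
      have := H (t+1) (by push_cast at h0 ⊢; omega) (by push_cast at hn ⊢; omega)
      convert this using 2 <;> push_cast <;> ring
  | case2 i j h =>
    simp only [decide_eq_true_eq]
    constructor
    · intro H t h0 hn
      exfalso; omega
    · intro H
      by_contra hc
      simp only [not_or, not_lt, not_le] at hc
      have h0 : 0 ≤ i := by omega
      have hn : j < (l.length : Int) := by omega
      have := H 0 (by simpa using h0) (by simpa using hn)
      simp at this
      exact h ⟨h0, hn, this⟩

-- the aligned prefix equals the reversed aligned suffix iff the pairs match pointwise
theorem seg_iff (l : List Char) (K m : Nat) (hm1 : m ≤ K) (hm2 : K + m ≤ l.length) :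
    ((l.take K).drop (K - m) = ((l.drop K).take m).reverse) ↔
      ∀ s, s < m → l[K - 1 - s]? = l[K + s]? := by
  have hKn : K ≤ l.length := by omega
  have hlenB : ((l.drop K).take m).length = m := by simp; omega
  have hA : ∀ t, t < m → ((l.take K).drop (K - m))[t]? = l[K - m + t]? := by
    intro t ht
    rw [List.getElem?_drop, List.getElem?_take_of_lt (by omega)]
  have hB : ∀ t, t < m → (((l.drop K).take m).reverse)[t]? = l[K + (m - 1 - t)]? := by
    intro t ht
    rw [List.getElem?_reverse (by omega), hlenB, List.getElem?_take_of_lt (by omega),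
      List.getElem?_drop]
  constructor
  · intro H s hs
    have := congrArg (fun xs => xs[m - 1 - s]?) H
    simp only at this
    rw [hA _ (by omega), hB _ (by omega)] at this
    have e1 : K - m + (m - 1 - s) = K - 1 - s := by omega
    have e2 : K + (m - 1 - (m - 1 - s)) = K + s := by omega
    rw [e1, e2] at this
    exact this
  · intro H
    apply List.ext_getElem?
    intro i
    by_cases hi : i < m
    · rw [hA _ hi, hB _ hi]
      have := H (m - 1 - i) (by omega)
      have e1 : K - 1 - (m - 1 - i) = K - m + i := by omega
      rw [e1] at this
      exact this
    · rw [List.getElem?_eq_none (by simp; omega), List.getElem?_eq_none (by simp [hlenB]; omega)]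

-- A's per-split condition, reduced to pointwise option-indexing
theorem condA_iff (l : List Char) (k : Int) (h1 : 1 ≤ k) (h2 : k < (l.length : Int)) :
    ((let original_line := PySem.List.slice l (some 0) (some k)
      let reflected_line := PySem.List.slice l (some k) none
      let reflected_line2 :=
        if original_line.length < reflected_line.length then
          PySem.List.slice reflected_line none (some (original_line.length : Int))
        else reflected_line
      let original_line2 :=
        if original_line.length > reflected_line.length then
          PySem.List.slice original_line
            (some ((original_line.length : Int) - (reflected_line.length : Int))) none
        else original_line
      original_line2 = reflected_line2.reverse)) ↔
      (∀ s : Nat, s < min k.toNat (l.length - k.toNat) →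
        l[k.toNat - 1 - s]? = l[k.toNat + s]?) := by
  have hK : (k.toNat : Int) = k := Int.toNat_of_nonneg (by omega)
  have hKn : k.toNat < l.length := by omega
  have ho : PySem.List.slice l (some 0) (some k) = l.take k.toNat := by
    rw [PySem.List.slice_zero_start, PySem.List.slice_to l (by omega)]
  have hr : PySem.List.slice l (some k) none = l.drop k.toNat := by
    rw [PySem.List.slice_from l (by omega)]
  have hlo : (l.take k.toNat).length = k.toNat := by simp; omega
  have hlr : (l.drop k.toNat).length = l.length - k.toNat := by simp
  simp only [ho, hr, hlo, hlr]
  rcases Nat.lt_trichotomy k.toNat (l.length - k.toNat) with hc | hc | hc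
  · rw [if_pos hc, if_neg (show ¬ k.toNat > l.length - k.toNat by omega),
      PySem.List.slice_to_natCast (l.drop k.toNat) k.toNat]
    have hm : min k.toNat (l.length - k.toNat) = k.toNat := by omega
    rw [hm]
    have := seg_iff l k.toNat k.toNat le_rfl (by omega)
    rw [Nat.sub_self, List.drop_zero] at this
    exact this
  · rw [if_neg (show ¬ k.toNat > l.length - k.toNat by omega),
      if_neg (show ¬ k.toNat < l.length - k.toNat by omega)]
    have hm : min k.toNat (l.length - k.toNat) = k.toNat := by omega
    rw [hm]
    have := seg_iff l k.toNat k.toNat le_rfl (by omega)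
    rw [Nat.sub_self, List.drop_zero] at this
    rw [List.take_of_length_le (l := l.drop k.toNat) (i := k.toNat) (by simp; omega)] at this
    exact this
  · rw [if_pos (show k.toNat > l.length - k.toNat by omega),
      if_neg (show ¬ k.toNat < l.length - k.toNat by omega),
      PySem.List.slice_from (l.take k.toNat) (by omega)]
    have hm : min k.toNat (l.length - k.toNat) = l.length - k.toNat := by omega
    rw [hm]
    have ht : ((k.toNat : Int) - ((l.length - k.toNat : Nat) : Int)).toNat
        = k.toNat - (l.length - k.toNat) := by omega
    rw [ht]
    have := seg_iff l k.toNat (l.length - k.toNat) (by omega) (by omega)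
    rw [List.take_of_length_le (l := l.drop k.toNat) (i := l.length - k.toNat) (by simp)] at this
    exact this

-- B's per-split condition, reduced to the same pointwise form
theorem condB_iff (l : List Char) (k : Int) (h1 : 1 ≤ k) (h2 : k < (l.length : Int)) :
    pvExpand l (k - 1) k = true ↔
      (∀ s : Nat, s < min k.toNat (l.length - k.toNat) →
        l[k.toNat - 1 - s]? = l[k.toNat + s]?) := by
  rw [pvExpand_iff]
  have hK : (k.toNat : Int) = k := Int.toNat_of_nonneg (by omega)
  have e1 : ∀ s : Nat, (s : Int) ≤ k - 1 →
      PySem.List.pyGet? l (k - 1 - (s : Int)) = l[k.toNat - 1 - s]? := by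
    intro s hs
    rw [PySem.List.pyGet?_of_nonneg l (by omega)]
    congr 1
    omega
  have e2 : ∀ s : Nat, PySem.List.pyGet? l (k + (s : Int)) = l[k.toNat + s]? := by
    intro s
    rw [PySem.List.pyGet?_of_nonneg l (by omega)]
    congr 1
    omega
  constructor
  · intro H s hs
    rw [← e1 s (by omega), ← e2 s]
    exact H s (by omega) (by omega)
  · intro H t h0 hn
    rw [e1 t (by omega), e2 t]
    exact H t (by omega)

-- ===== VERDICT (by name: the statement is the Claim_ definition above) =====
theorem get_reflection_points_spec : Claim_equal_get_reflection_points := by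
  intro line _
  unfold Spec_get_reflection_points get_reflection_points get_reflection_points_alt
  simp only
  rw [PySem.List.foldl_append_ite_eq_filter, PySem.List.foldl_append_ite_eq_filter]
  refine congrArg _ (List.filter_congr ?_)
  intro k hk
  rw [PySem.List.mem_pyRange_one] at hk
  simp only [decide_eq_decide]
  rw [condA_iff _ _ hk.1 hk.2, condB_iff _ _ hk.1 hk.2]
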